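-- pv_equiv track=rewrite | github.com/twinly92/python_statRolls | rollStats.py | dropLow
-- ===== SOURCE A (Python) =====
-- def dropLow(s1, s2, s3, s4):
-- 	inRoll=[s1, s2, s3, s4]
-- 	keeps=[]
-- 	i=0
-- 	while i < 3:
-- 		keeps.append(max(inRoll))
-- 		inRoll.remove(max(inRoll))
-- 		i += 1
-- 	return keeps
-- ===== SOURCE B (Python) =====
-- def dropLow(s1, s2, s3, s4):
--     return sorted([s1, s2, s3, s4], reverse=True)[:3]
-- ===== Notes on version B (the rewrite author's own statement) =====
-- stated objective: simpler
-- what changed: Replaced the three-iteration max-scan-and-remove loop on a mutable list with a single descending sort followed by a slice of the first three elements.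
import Mathlib
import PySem

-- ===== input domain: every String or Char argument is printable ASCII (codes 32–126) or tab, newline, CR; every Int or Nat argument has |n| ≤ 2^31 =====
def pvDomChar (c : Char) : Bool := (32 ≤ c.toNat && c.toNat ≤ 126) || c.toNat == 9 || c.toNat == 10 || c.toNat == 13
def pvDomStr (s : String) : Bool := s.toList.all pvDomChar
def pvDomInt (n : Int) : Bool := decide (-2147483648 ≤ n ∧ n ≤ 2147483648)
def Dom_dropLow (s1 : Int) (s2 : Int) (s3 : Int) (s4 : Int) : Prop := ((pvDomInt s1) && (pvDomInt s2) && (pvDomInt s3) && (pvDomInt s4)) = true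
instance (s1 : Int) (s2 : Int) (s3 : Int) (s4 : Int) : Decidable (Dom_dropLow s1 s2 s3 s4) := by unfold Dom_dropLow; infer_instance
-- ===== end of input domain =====

-- B replaces A's repeated max-scan-and-remove loop with one descending sort plus a slice (simpler).

-- ===== PORT A =====
-- the 'while i < 3' loop: keeps.append(max(inRoll)); inRoll.remove(max(inRoll))
-- (max on these lists is never [], and max(inRoll) ∈ inRoll, so the 'none' arms are unreachable)
def dropLowLoop : Nat → List Int → List Int → List Int
  | 0, _, keeps => keeps
  | n+1, inRoll, keeps =>
    match PySem.List.max? inRoll (fun x => x) with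
    | none => keeps
    | some m =>
      match PySem.List.remove? inRoll m with
      | none => keeps
      | some rest => dropLowLoop n rest (keeps ++ [m])

def dropLow (s1 : Int) (s2 : Int) (s3 : Int) (s4 : Int) : List Int :=
  dropLowLoop 3 [s1, s2, s3, s4] []

-- ===== PORT B =====
-- sorted([s1, s2, s3, s4], reverse=True)[:3]
def dropLow_alt (s1 : Int) (s2 : Int) (s3 : Int) (s4 : Int) : List Int :=
  PySem.List.slice (PySem.List.sorted [s1, s2, s3, s4] (fun x => x) true) none (some 3)

-- ===== PRECONDITION & SPEC =====
def Spec_dropLow (s1 : Int) (s2 : Int) (s3 : Int) (s4 : Int) (out : List Int) : Prop := out = dropLow_alt s1 s2 s3 s4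
instance (s1 : Int) (s2 : Int) (s3 : Int) (s4 : Int) (out : List Int) : Decidable (Spec_dropLow s1 s2 s3 s4 out) := by unfold Spec_dropLow; infer_instance

-- ===== CLAIM (what is proved, stated in full; the proofs are below) =====
def Claim_equal_dropLow : Prop := ∀ (s1 : Int) (s2 : Int) (s3 : Int) (s4 : Int), Dom_dropLow s1 s2 s3 s4 → Spec_dropLow s1 s2 s3 s4 (dropLow s1 s2 s3 s4)

-- ===== LEMMAS AND PROOFS =====
-- rewrite rules letting simp decide equality/order tests from a strict-order hypothesis
theorem lt_ne_int (a b : Int) (h : a < b) : (a = b) = False := by simp [ne_of_lt h]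
theorem lt_ne_int' (a b : Int) (h : a < b) : (b = a) = False := by simp [(ne_of_lt h).symm]
theorem lt_not_lt_int (a b : Int) (h : a < b) : (b < a) = False := by simp; omega

set_option maxHeartbeats 4000000 in
theorem dropLow_eq_alt (s1 s2 s3 s4 : Int) : dropLow s1 s2 s3 s4 = dropLow_alt s1 s2 s3 s4 := by
  rcases lt_trichotomy s1 s2 with h12|h12|h12 <;>
  rcases lt_trichotomy s1 s3 with h13|h13|h13 <;>
  rcases lt_trichotomy s1 s4 with h14|h14|h14 <;>
  rcases lt_trichotomy s2 s3 with h23|h23|h23 <;>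
  rcases lt_trichotomy s2 s4 with h24|h24|h24 <;>
  rcases lt_trichotomy s3 s4 with h34|h34|h34 <;>
  simp_all [dropLow, dropLow_alt, dropLowLoop, PySem.List.max?, PySem.List.remove?,
    PySem.List.sorted, PySem.List.insertBy, PySem.List.slice, List.idxOf?, List.findIdx?_cons,
    beq_iff_eq, List.eraseIdx, lt_ne_int, lt_ne_int', lt_not_lt_int] <;> omega

-- ===== VERDICT (by name: the statement is the Claim_ definition above) =====
theorem dropLow_spec : Claim_equal_dropLow := by
  intro s1 s2 s3 s4 _
  unfold Spec_dropLow
  exact dropLow_eq_alt s1 s2 s3 s4
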